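-- pv_equiv track=rewrite | github.com/cgustin99/OpenParticle | openparticle/src.py | is_normal_ordered
-- ===== SOURCE A (Python) =====
-- def is_normal_ordered(ops):
--     """
--     check if the ops is normal_ordered
--     expects: ops should be a list of ops in a single type
--     """
--     found_non_creation = False
--     for op in ops:
--         # if op is creation
--         if op[-1] == "^":
--             if found_non_creation:
--                 return False
--         else:
--             found_non_creation = True
--     return True
-- ===== SOURCE B (Python) =====
-- def is_normal_ordered(ops):
--     creations = [op for op in ops if op[-1] == "^"]
--     return ops[:len(creations)] == creations
-- ===== Notes on version B (the rewrite author's own statement) =====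
-- stated objective: simpler
-- what changed: Replaced the stateful flag loop with a filter-then-prefix-compare: collect the creation operators and check they form exactly the prefix of ops of that length.
-- outside the precondition, e.g. on is_normal_ordered(['a', 'a^', '']): A returns False, B raises IndexError; on is_normal_ordered(['']): A raises IndexError, B raises IndexError
import Mathlib
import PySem

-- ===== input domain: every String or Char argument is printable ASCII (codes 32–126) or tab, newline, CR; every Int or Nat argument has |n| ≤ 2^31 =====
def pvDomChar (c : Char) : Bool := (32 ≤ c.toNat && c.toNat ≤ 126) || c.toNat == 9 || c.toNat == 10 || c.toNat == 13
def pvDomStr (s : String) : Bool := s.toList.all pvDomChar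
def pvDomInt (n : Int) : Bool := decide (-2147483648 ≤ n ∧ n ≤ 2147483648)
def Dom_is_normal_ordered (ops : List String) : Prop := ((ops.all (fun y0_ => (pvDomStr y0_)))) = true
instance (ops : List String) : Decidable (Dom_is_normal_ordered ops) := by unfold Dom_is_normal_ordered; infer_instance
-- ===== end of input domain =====

-- B replaces A's stateful found_non_creation flag loop by filtering the creation
-- operators and comparing them with the prefix of ops of the same length (simpler decomposition).


-- ===== PORT A =====
-- the for-loop over ops with its found_non_creation flag, as structural recursion
def pvLoopA : List String → Bool → Bool
  | [], _ => true
  | op :: rest, found =>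
      if PySem.Str.pyGet? op (-1) = some '^' then
        if found then false else pvLoopA rest found
      else pvLoopA rest true

def is_normal_ordered (ops : List String) : Bool := pvLoopA ops false

-- ===== PORT B =====
-- creations = [op for op in ops if op[-1] == '^']; return ops[:len(creations)] == creations
def is_normal_ordered_alt (ops : List String) : Bool :=
  let creations := ops.filter (fun op => PySem.Str.pyGet? op (-1) = some '^')
  PySem.List.slice ops none (some ((creations.length : Nat) : Int)) = creations

-- ===== PRECONDITION & SPEC =====
-- Pre_ excludes lists containing an empty string: op[-1] raises IndexError there
-- (A on the first empty op its loop reaches, B on any empty op in the list).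
def Pre_is_normal_ordered (ops : List String) : Prop := ∀ op ∈ ops, op ≠ ""
instance (ops : List String) : Decidable (Pre_is_normal_ordered ops) := by unfold Pre_is_normal_ordered; infer_instance
def pvWitness_is_normal_ordered : List String := ["a^", "b"]

def Spec_is_normal_ordered (ops : List String) (out : Bool) : Prop := out = is_normal_ordered_alt ops
instance (ops : List String) (out : Bool) : Decidable (Spec_is_normal_ordered ops out) := by unfold Spec_is_normal_ordered; infer_instance

-- ===== CLAIM (what is proved, stated in full; the proofs are below) =====
def Claim_equal_is_normal_ordered : Prop := ∀ (ops : List String), Dom_is_normal_ordered ops → Pre_is_normal_ordered ops → Spec_is_normal_ordered ops (is_normal_ordered ops)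

-- ===== LEMMAS AND PROOFS =====

-- cast bookkeeping: xs[:n+1] with the bound written as ↑n + 1
lemma pvSliceCastSucc {α : Type} (xs : List α) (n : Nat) :
    PySem.List.slice xs none (some ((n : Int) + 1)) = xs.take (n + 1) := by
  have h1 : ((n : Int) + 1) = (((n + 1 : Nat) : Nat) : Int) := by push_cast; ring
  rw [h1, PySem.List.slice_to_natCast]

-- once the flag is set, the loop returns True iff no creation operator remains
lemma pvLoopA_true (ops : List String) :
    pvLoopA ops true = (ops.filter (fun op => PySem.Str.pyGet? op (-1) = some '^')).isEmpty := by
  induction ops with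
  | nil => rfl
  | cons op rest ih =>
    by_cases h : PySem.Str.pyGet? op (-1) = some '^'
    all_goals have h' := h
    all_goals simp only [PySem.Str.pyGet?_eq, PySem.Chars.pyGet?_eq_listPyGet?] at h'
    · simp [pvLoopA, h']
    · simp [pvLoopA, h', ih]

-- the flag-off loop computes B's filter-prefix comparison
lemma pvLoopA_false (ops : List String) :
    pvLoopA ops false = is_normal_ordered_alt ops := by
  induction ops with
  | nil => rfl
  | cons op rest ih =>
    by_cases h : PySem.Str.pyGet? op (-1) = some '^'
    · have h' := h; simp only [PySem.Str.pyGet?_eq, PySem.Chars.pyGet?_eq_listPyGet?] at h'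
      simp only [pvLoopA, if_pos h, ih, is_normal_ordered_alt, List.filter_cons]
      simp [h', pvSliceCastSucc, List.take_succ_cons]
    · have h' : ¬ PySem.List.pyGet? op.toList (-1) = some '^' := by
        simpa only [PySem.Str.pyGet?_eq, PySem.Chars.pyGet?_eq_listPyGet?] using h
      simp only [pvLoopA, if_neg h, pvLoopA_true, is_normal_ordered_alt, List.filter_cons,
        PySem.List.slice_to_natCast]
      rcases hf : rest.filter (fun op => PySem.Str.pyGet? op (-1) = some '^') with _ | ⟨c, cs⟩
      · simp [h']
      · have hc : PySem.Str.pyGet? c (-1) = some '^' := by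
          have := List.mem_filter.mp (hf ▸ List.mem_cons_self (l := cs))
          simpa using this.2
        have hne : op ≠ c := fun e => h (e ▸ hc)
        simp [h', List.take_succ_cons, hne]

-- ===== VERDICT (by name: the statement is the Claim_ definition above) =====
theorem is_normal_ordered_spec : Claim_equal_is_normal_ordered := by
  intro ops _ _
  unfold Spec_is_normal_ordered is_normal_ordered
  exact pvLoopA_false ops
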